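-- pv_equiv track=rewrite | github.com/almazuulu/AlphaMasterClass_Test | Task1/data_referall.py | get_referrals
-- ===== SOURCE A (Python) =====
-- def get_referrals(email, referral_tree, level=0, is_root=True):
--     """
--     Recursively finds all referrals for a given email, including the email itself at the top.
--
--     :param email: The email to find referrals for.
--     :param referral_tree: The data structure containing the referral relationships.
--     :param level: The current level of depth in the referral tree.
--     :param is_root: Boolean indicating if the function is being called for the root email.
--     :return: A list of strings representing the referral hierarchy.
--     """
--     output = []
--     indent = "    "  # Four spaces for indentation
--
--     if level == 0:
--         output.append(email)
--     else:
--         output.append(f"{indent * (level - 1)}>>>> {email}")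
--
--     if email in referral_tree:
--         for referral in referral_tree[email]:
--             output.extend(get_referrals(referral, referral_tree, level + 1))
--     return output
-- ===== SOURCE B (Python) =====
-- def get_referrals(email, referral_tree, level=0, is_root=True):
--     """Iterative DFS with an explicit stack instead of recursion."""
--     output = []
--     indent = "    "
--     stack = [(email, level)]
--     while stack:
--         cur, lvl = stack.pop()
--         if lvl == 0:
--             output.append(cur)
--         else:
--             output.append(f"{indent * (lvl - 1)}>>>> {cur}")
--         if cur in referral_tree:
--             for child in reversed(referral_tree[cur]):
--                 stack.append((child, lvl + 1))
--     return output
-- ===== Notes on version B (the rewrite author's own statement) =====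
-- stated objective: alternative
-- what changed: Replaces A's recursive pre-order DFS by an iterative DFS over an explicit stack of (node, level) pairs, pushing children in reversed order so the pop sequence reproduces A's left-to-right pre-order.
import Mathlib
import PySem

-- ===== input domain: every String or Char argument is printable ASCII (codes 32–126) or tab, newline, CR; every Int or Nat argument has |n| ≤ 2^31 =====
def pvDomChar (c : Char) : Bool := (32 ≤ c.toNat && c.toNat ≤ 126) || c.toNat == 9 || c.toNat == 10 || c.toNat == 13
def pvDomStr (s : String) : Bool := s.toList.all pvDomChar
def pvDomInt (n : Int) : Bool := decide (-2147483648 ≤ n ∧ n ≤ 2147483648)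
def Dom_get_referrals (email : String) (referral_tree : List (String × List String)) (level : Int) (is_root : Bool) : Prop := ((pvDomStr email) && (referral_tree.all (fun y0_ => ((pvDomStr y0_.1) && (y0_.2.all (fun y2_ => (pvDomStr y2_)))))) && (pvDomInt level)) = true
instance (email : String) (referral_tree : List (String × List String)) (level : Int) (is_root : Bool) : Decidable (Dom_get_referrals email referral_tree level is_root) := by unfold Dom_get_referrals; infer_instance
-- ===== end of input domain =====

-- B replaces A's recursion by an iterative pre-order DFS over an explicit stack (same return value; no speed claim).

-- shared by both ports: the formatted line for one node
-- (level == 0 → the bare email; else "    "*(level-1) ++ ">>>> " ++ email; Python's str*n is '' for n ≤ 0, hence .toNat)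
def pvLine (lvl : Int) (e : String) : String :=
  if lvl == 0 then e else String.join (List.replicate (lvl - 1).toNat "    ") ++ ">>>> " ++ e

-- ===== PORT A =====
-- A's recursion has no structural measure (a cyclic referral_tree makes Python recurse forever,
-- RecursionError); the fuel `referral_tree.length + 1` is a pure totality guard: under
-- Pre_get_referrals (every chain fits in that depth) it is never exhausted.
def pvGoA (t : List (String × List String)) : Nat → String → Int → List String
  | 0, _, _ => []
  | f + 1, e, l =>
    let output := [pvLine l e]
    match (PySem.Dict.mk t).get? e with      -- `if email in referral_tree: … referral_tree[email]`
    | some cs => cs.foldl (fun out c => out ++ pvGoA t f c (l + 1)) output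
    | none => output

def get_referrals (email : String) (referral_tree : List (String × List String)) (level : Int) (is_root : Bool) : List String :=
  pvGoA referral_tree (referral_tree.length + 1) email level

-- ===== PORT B =====
-- stack is a Lean list with HEAD = Python's end-of-list top, so Source B's
-- `stack.extend(reversed(children)); stack.pop()` is `children.map … ++ st` with a head pop.
-- The fuel bounds the number of loop iterations (= nodes printed), which under Pre_ is at most
-- (max children count + 1) ^ (referral_tree.length + 1); it is a pure totality guard for the while loop.
def pvMaxKids (t : List (String × List String)) : Nat :=
  t.foldl (fun m p => max m p.2.length) 0

def pvGoB (t : List (String × List String)) : Nat → List (String × Int) → List String → List String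
  | 0, _, output => output
  | _ + 1, [], output => output
  | f + 1, (cur, lvl) :: st, output =>
    let output := output ++ [pvLine lvl cur]
    match (PySem.Dict.mk t).get? cur with
    | some cs => pvGoB t f (cs.map (fun c => (c, lvl + 1)) ++ st) output
    | none => pvGoB t f st output

def get_referrals_alt (email : String) (referral_tree : List (String × List String)) (level : Int) (is_root : Bool) : List String :=
  pvGoB referral_tree ((pvMaxKids referral_tree + 1) ^ (referral_tree.length + 1)) [(email, level)] []

-- ===== PRECONDITION & SPEC =====
-- Pre_ excludes exactly the inputs on which Python's A never returns: a referral chain from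
-- `email` that revisits a key loops forever (RecursionError). `pvChainOk t f e = true` says every
-- referral chain starting at e has at most f nodes; a chain that cannot repeat a key has at most
-- (number of entries + 1) nodes, so this bound holds exactly when the reachable graph is acyclic.
def pvChainOk (t : List (String × List String)) : Nat → String → Bool
  | 0, _ => false
  | f + 1, e =>
    match (PySem.Dict.mk t).get? e with
    | some cs => cs.all (pvChainOk t f)
    | none => true

def Pre_get_referrals (email : String) (referral_tree : List (String × List String)) (level : Int) (is_root : Bool) : Prop :=
  pvChainOk referral_tree (referral_tree.length + 1) email = true

instance (email : String) (referral_tree : List (String × List String)) (level : Int) (is_root : Bool) : Decidable (Pre_get_referrals email referral_tree level is_root) := by unfold Pre_get_referrals; infer_instance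

def pvWitness_get_referrals : String × (List (String × List String)) × Int × Bool :=
  ("a", [("a", ["b", "c"]), ("b", ["d"])], 0, true)

def Spec_get_referrals (email : String) (referral_tree : List (String × List String)) (level : Int) (is_root : Bool) (out : List String) : Prop := out = get_referrals_alt email referral_tree level is_root
instance (email : String) (referral_tree : List (String × List String)) (level : Int) (is_root : Bool) (out : List String) : Decidable (Spec_get_referrals email referral_tree level is_root out) := by unfold Spec_get_referrals; infer_instance

-- ===== CLAIM (what is proved, stated in full; the proofs are below) =====
def Claim_equal_get_referrals : Prop := ∀ (email : String) (referral_tree : List (String × List String)) (level : Int) (is_root : Bool), Dom_get_referrals email referral_tree level is_root → Pre_get_referrals email referral_tree level is_root → Spec_get_referrals email referral_tree level is_root (get_referrals email referral_tree level is_root)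

-- ===== LEMMAS AND PROOFS =====

-- A's child loop as a flatMap
theorem pvGoA_succ (t : List (String × List String)) (f : Nat) (e : String) (l : Int) :
    pvGoA t (f + 1) e l =
      pvLine l e :: (match (PySem.Dict.mk t).get? e with
        | some cs => cs.flatMap (fun c => pvGoA t f c (l + 1))
        | none => []) := by
  cases h : (PySem.Dict.mk t).get? e with
  | none => simp [pvGoA, h]
  | some cs => simp [pvGoA, h, List.flatMap_def, PySem.List.foldl_append_eq_flatMap]

theorem pvGoB_nil (t : List (String × List String)) (f : Nat) (out : List String) :
    pvGoB t f [] out = out := by cases f <;> simp [pvGoB]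

-- foldl max: the accumulator only grows, and the fold is monotone in it
theorem pvFoldlMax_le_init (t : List (String × List String)) (a : Nat) :
    a ≤ t.foldl (fun m p => max m p.2.length) a := by
  induction t generalizing a with
  | nil => simp
  | cons r rs ih => exact le_trans (le_max_left a r.2.length) (ih _)

theorem pvFoldlMax_mono (t : List (String × List String)) (a b : Nat) (h : a ≤ b) :
    t.foldl (fun m p => max m p.2.length) a ≤ t.foldl (fun m p => max m p.2.length) b := by
  induction t generalizing a b with
  | nil => simpa using h
  | cons r rs ih => exact ih _ _ (max_le_max_right _ h)

-- values looked up in the dict are bounded by pvMaxKids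
theorem pvGet_length_le (t : List (String × List String)) (e : String) (cs : List String)
    (h : (PySem.Dict.mk t).get? e = some cs) : cs.length ≤ pvMaxKids t := by
  induction t with
  | nil => simp [PySem.Dict.get?] at h
  | cons q qs ih =>
    rw [PySem.Dict.get?_mk_cons] at h
    by_cases hk : q.1 == e
    · simp only [hk, if_pos] at h
      cases h
      unfold pvMaxKids
      simp only [List.foldl_cons]
      exact le_trans (le_max_right 0 _) (pvFoldlMax_le_init qs _)
    · simp only [hk, Bool.false_eq_true, if_false] at h
      refine le_trans (ih h) ?_
      unfold pvMaxKids
      simp only [List.foldl_cons]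
      exact pvFoldlMax_mono qs _ _ (Nat.zero_le _)

-- output length bound: under pvChainOk f, A's output from one node has ≤ (maxKids+1)^f lines
theorem pvGoA_length_le (t : List (String × List String)) :
    ∀ (f : Nat) (e : String) (l : Int), pvChainOk t f e = true →
      (pvGoA t f e l).length ≤ (pvMaxKids t + 1) ^ f := by
  intro f
  induction f with
  | zero => intro e l h; simp [pvChainOk] at h
  | succ f ih =>
    intro e l h
    rw [pvGoA_succ]
    cases hg : (PySem.Dict.mk t).get? e with
    | none =>
      have := Nat.one_le_pow (f + 1) (pvMaxKids t + 1) (Nat.succ_pos _)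
      simpa using this
    | some cs =>
      have hok : ∀ c ∈ cs, pvChainOk t f c = true := by
        simp [pvChainOk, hg, List.all_eq_true] at h; exact h
      have hlen : (cs.flatMap (fun c => pvGoA t f c (l + 1))).length ≤ cs.length * (pvMaxKids t + 1) ^ f := by
        rw [List.length_flatMap]
        calc (cs.map (fun c => (pvGoA t f c (l + 1)).length)).sum
            ≤ (cs.map (fun _ => (pvMaxKids t + 1) ^ f)).sum :=
              List.sum_le_sum (fun c hc => ih c (l + 1) (hok c hc))
          _ = cs.length * (pvMaxKids t + 1) ^ f := by
              simp [List.map_const', List.sum_replicate, smul_eq_mul]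
      have hcs := pvGet_length_le t e cs hg
      have hpow : 1 ≤ (pvMaxKids t + 1) ^ f := Nat.one_le_pow _ _ (Nat.succ_pos _)
      simp only [List.length_cons]
      have h2 : cs.length * (pvMaxKids t + 1) ^ f ≤ pvMaxKids t * (pvMaxKids t + 1) ^ f :=
        Nat.mul_le_mul_right _ hcs
      calc (cs.flatMap (fun c => pvGoA t f c (l + 1))).length + 1
          ≤ pvMaxKids t * (pvMaxKids t + 1) ^ f + 1 := by omega
        _ ≤ (pvMaxKids t + 1) ^ (f + 1) := by rw [pow_succ]; nlinarith [hpow]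

-- main simulation: popping (e,l) with exact fuel = |A's subtree output| consumes it onto the accumulator
theorem pvGoB_sim (t : List (String × List String)) :
    ∀ (f : Nat) (e : String) (l : Int), pvChainOk t f e = true →
      ∀ (st : List (String × Int)) (out : List String) (m : Nat),
        pvGoB t ((pvGoA t f e l).length + m) ((e, l) :: st) out =
          pvGoB t m st (out ++ pvGoA t f e l) := by
  intro f
  induction f with
  | zero => intro e l h; simp [pvChainOk] at h
  | succ f ih =>
    intro e l h st out m
    rw [pvGoA_succ]
    cases hg : (PySem.Dict.mk t).get? e with
    | none =>
      simp only [List.length_cons, List.length_nil]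
      show pvGoB t (0 + 1 + m) ((e, l) :: st) out = _
      have : 0 + 1 + m = m + 1 := by omega
      rw [this]
      simp [pvGoB, hg]
    | some cs =>
      have hok : ∀ c ∈ cs, pvChainOk t f c = true := by
        simp [pvChainOk, hg, List.all_eq_true] at h; exact h
      simp only [List.length_cons]
      have hstep : (cs.flatMap (fun c => pvGoA t f c (l + 1))).length + 1 + m
          = ((cs.flatMap (fun c => pvGoA t f c (l + 1))).length + m) + 1 := by omega
      rw [hstep]
      show pvGoB t (_ + 1) ((e, l) :: st) out = _
      simp only [pvGoB, hg]
      -- inner induction over the children list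
      have inner : ∀ (cs : List String), (∀ c ∈ cs, pvChainOk t f c = true) →
          ∀ (st : List (String × Int)) (out : List String) (m : Nat),
            pvGoB t ((cs.flatMap (fun c => pvGoA t f c (l + 1))).length + m)
              (cs.map (fun c => (c, l + 1)) ++ st) out =
            pvGoB t m st (out ++ cs.flatMap (fun c => pvGoA t f c (l + 1))) := by
        intro cs hcs
        induction cs with
        | nil => intro st out m; simp
        | cons c cs' ih2 =>
          intro st out m
          simp only [List.flatMap_cons, List.map_cons, List.length_append, List.cons_append]
          have harr : (pvGoA t f c (l + 1)).length + (cs'.flatMap (fun c => pvGoA t f c (l + 1))).length + m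
              = (pvGoA t f c (l + 1)).length + ((cs'.flatMap (fun c => pvGoA t f c (l + 1))).length + m) := by omega
          rw [harr, ih c (l + 1) (hcs c (by simp)) _ out _]
          rw [ih2 (fun c hc => hcs c (by simp [hc])) st _ _]
          simp [List.append_assoc]
      have := inner cs hok st (out ++ [pvLine l e]) m
      simpa [List.append_assoc] using this

-- ===== VERDICT (by name: the statement is the Claim_ definition above) =====
theorem get_referrals_spec : Claim_equal_get_referrals := by
  intro email t level is_root _ hpre
  unfold Spec_get_referrals get_referrals get_referrals_alt
  have hlen := pvGoA_length_le t (t.length + 1) email level hpre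
  set F := (pvMaxKids t + 1) ^ (t.length + 1) with hF
  have hsplit : F = (pvGoA t (t.length + 1) email level).length
      + (F - (pvGoA t (t.length + 1) email level).length) := by omega
  rw [hsplit, pvGoB_sim t (t.length + 1) email level hpre [] [] _, pvGoB_nil]
  simp
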